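-- pv_equiv track=rewrite | github.com/jointavbench/JointAVBench | gen_caption/audio_caption.py | batch_inputs
-- ===== SOURCE A (Python) =====
-- def batch_inputs(inputs, metadata, max_duration=512):
--     current_batch = []
--     current_metadata = []
--     current_duration = 0
--     for input_data, meta in zip(inputs,metadata):
--         duration = meta[-1]
--         if current_duration + duration <= max_duration:
--             current_batch.append(input_data)
--             current_metadata.append(meta)
--             current_duration += duration
--         else:
--             if current_batch:
--                 yield current_batch, current_metadata
--             current_batch = [input_data]
--             current_metadata = [meta]
--             current_duration = duration
--
--     if current_batch:
--         yield current_batch, current_metadata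
-- ===== SOURCE B (Python) =====
-- def batch_inputs(inputs, metadata, max_duration=512):
--     # Two-pass decomposition: first compute the greedy batch sizes, then
--     # slice the materialized (input, meta) pairs by those sizes.
--     pairs = list(zip(inputs, metadata))
--     sizes = []
--     running = 0
--     count = 0
--     for _, meta in pairs:
--         d = meta[-1]
--         if count > 0 and running + d > max_duration:
--             sizes.append(count)
--             running = d
--             count = 1
--         else:
--             running += d
--             count += 1
--     if count > 0:
--         sizes.append(count)
--     pos = 0
--     for k in sizes:
--         chunk = pairs[pos:pos + k]
--         pos += k
--         yield [p[0] for p in chunk], [p[1] for p in chunk]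
-- ===== Notes on version B (the rewrite author's own statement) =====
-- stated objective: alternative
-- what changed: Replaces A's single accumulate-and-yield generator loop by a two-pass decomposition: a first pass computes the greedy batch sizes, a second pass slices the materialized (input, meta) pair list by those sizes.
import Mathlib
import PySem

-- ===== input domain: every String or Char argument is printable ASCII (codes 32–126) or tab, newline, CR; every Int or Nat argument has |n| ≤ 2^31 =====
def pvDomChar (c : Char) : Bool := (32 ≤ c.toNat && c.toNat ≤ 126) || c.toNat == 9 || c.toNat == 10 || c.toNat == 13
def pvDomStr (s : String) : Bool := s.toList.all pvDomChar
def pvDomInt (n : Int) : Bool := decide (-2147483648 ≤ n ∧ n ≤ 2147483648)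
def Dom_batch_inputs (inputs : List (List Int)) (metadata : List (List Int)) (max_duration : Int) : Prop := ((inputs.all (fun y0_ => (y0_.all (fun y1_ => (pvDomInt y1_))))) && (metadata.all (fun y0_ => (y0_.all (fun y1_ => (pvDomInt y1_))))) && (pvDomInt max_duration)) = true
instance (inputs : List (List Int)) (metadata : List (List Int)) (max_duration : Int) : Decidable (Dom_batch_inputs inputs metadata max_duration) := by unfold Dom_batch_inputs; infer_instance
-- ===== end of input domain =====

-- B replaces A's single accumulate-and-yield generator by two passes (compute greedy batch
-- sizes, then slice the pair list by those sizes); objective: alternative decomposition.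
-- A is a generator; equivalence is about the materialized list of yielded values.


-- ===== PORT A =====
-- A's for-loop over zip(inputs, metadata) as structural recursion over the zipped list,
-- carrying (current_batch, current_metadata, current_duration); yields become list elements.
-- meta[-1] is PySem.List.pyGet? meta (-1); Pre_ guarantees it is `some`, `.getD 0` is never used.
def pvAGo (max_duration : Int) :
    List (List Int × List Int) → List (List Int) → List (List Int) → Int →
    List (List (List Int) × List (List Int))
  | [], cb, cm, _ => if cb ≠ [] then [(cb, cm)] else []
  | (x, m) :: rest, cb, cm, cd =>
      let d := (PySem.List.pyGet? m (-1)).getD 0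
      if cd + d ≤ max_duration then
        pvAGo max_duration rest (cb ++ [x]) (cm ++ [m]) (cd + d)
      else
        (if cb ≠ [] then [(cb, cm)] else []) ++ pvAGo max_duration rest [x] [m] d

def batch_inputs (inputs : List (List Int)) (metadata : List (List Int)) (max_duration : Int) : List (List (List Int) × List (List Int)) :=
  pvAGo max_duration (inputs.zip metadata) [] [] 0

-- ===== PORT B =====
-- First pass of Source B: sizes of the greedy batches (the trailing `if count > 0: sizes.append(count)`
-- is the base case).
def pvSizes (max_duration : Int) :
    List (List Int × List Int) → Int → Int → List Int
  | [], _, count => if count > 0 then [count] else []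
  | (_, m) :: rest, running, count =>
      let d := (PySem.List.pyGet? m (-1)).getD 0
      if count > 0 ∧ running + d > max_duration then
        count :: pvSizes max_duration rest d 1
      else
        pvSizes max_duration rest (running + d) (count + 1)

-- Second pass of Source B: slice pairs[pos:pos+k] for each size k.
def pvEmit (pairs : List (List Int × List Int)) :
    List Int → Int → List (List (List Int) × List (List Int))
  | [], _ => []
  | k :: ks, pos =>
      let chunk := PySem.List.slice pairs (some pos) (some (pos + k))
      (chunk.map Prod.fst, chunk.map Prod.snd) :: pvEmit pairs ks (pos + k)

def batch_inputs_alt (inputs : List (List Int)) (metadata : List (List Int)) (max_duration : Int) : List (List (List Int) × List (List Int)) :=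
  let pairs := inputs.zip metadata
  pvEmit pairs (pvSizes max_duration pairs 0 0) 0

-- ===== PRECONDITION & SPEC =====
-- A raises IndexError on meta[-1] when some zipped metadata entry is the empty list; Pre_ excludes exactly that.
def Pre_batch_inputs (inputs : List (List Int)) (metadata : List (List Int)) (max_duration : Int) : Prop :=
  ∀ p ∈ inputs.zip metadata, p.2 ≠ []
instance (inputs : List (List Int)) (metadata : List (List Int)) (max_duration : Int) : Decidable (Pre_batch_inputs inputs metadata max_duration) := by unfold Pre_batch_inputs; infer_instance

def pvWitness_batch_inputs : List (List Int) × List (List Int) × Int :=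
  ([[1], [2], [3]], [[10, 3], [4], [2]], 5)

def Spec_batch_inputs (inputs : List (List Int)) (metadata : List (List Int)) (max_duration : Int) (out : List (List (List Int) × List (List Int))) : Prop := out = batch_inputs_alt inputs metadata max_duration
instance (inputs : List (List Int)) (metadata : List (List Int)) (max_duration : Int) (out : List (List (List Int) × List (List Int))) : Decidable (Spec_batch_inputs inputs metadata max_duration out) := by unfold Spec_batch_inputs; infer_instance

-- ===== CLAIM (what is proved, stated in full; the proofs are below) =====
def Claim_equal_batch_inputs : Prop := ∀ (inputs : List (List Int)) (metadata : List (List Int)) (max_duration : Int), Dom_batch_inputs inputs metadata max_duration → Pre_batch_inputs inputs metadata max_duration → Spec_batch_inputs inputs metadata max_duration (batch_inputs inputs metadata max_duration)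

-- ===== LEMMAS AND PROOFS =====

-- Main invariant: if the suffix of the full pair list from position `pos` is `g ++ rest`
-- (g = the current open batch, rest = the unprocessed pairs), A's loop state
-- (g.map fst, g.map snd, running) and B's passes produce the same output.
theorem pv_main (max_duration : Int) (P : List (List Int × List Int)) :
    ∀ (rest g : List (List Int × List Int)) (running : Int) (pos : Nat),
      P.drop pos = g ++ rest → (g = [] → running = 0) →
      pvAGo max_duration rest (g.map Prod.fst) (g.map Prod.snd) running
        = pvEmit P (pvSizes max_duration rest running (g.length : Int)) (pos : Int) := by
  intro rest
  induction rest with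
  | nil =>
    intro g running pos hdrop _
    cases g with
    | nil => simp [pvAGo, pvSizes, pvEmit]
    | cons a g' =>
      have hlen : (0 : Int) < ((a :: g').length : Int) := by
        simp
      simp only [pvAGo, pvSizes, if_pos hlen]
      have hchunk : PySem.List.slice P (some (pos : Int))
          (some ((pos : Int) + (((a :: g').length : Nat) : Int))) = a :: g' := by
        rw [PySem.List.slice_natCast_add, hdrop]
        simp
      have hchunk' : PySem.List.slice P (some (pos : Int))
          (some ((pos : Int) + ((g'.length : Int) + 1))) = a :: g' := by
        rw [show ((pos : Int) + ((g'.length : Int) + 1))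
            = (pos : Int) + (((a :: g').length : Nat) : Int) from by
          simp [List.length_cons]]
        exact hchunk
      simp only [pvEmit, List.length_cons, List.map_cons, Nat.cast_add, Nat.cast_one]
      rw [hchunk']
      simp
  | cons p rest ih =>
    intro g running pos hdrop hz
    obtain ⟨x, m⟩ := p
    simp only [pvAGo, pvSizes]
    set d := (PySem.List.pyGet? m (-1)).getD 0 with hd
    by_cases hle : running + d ≤ max_duration
    · -- A takes the then-branch; B's boundary condition is false
      have hnb : ¬ (((g.length : Int) > 0) ∧ running + d > max_duration) := by
        rintro ⟨_, h⟩; omega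
      rw [if_pos hle, if_neg hnb]
      have h1 : P.drop pos = (g ++ [(x, m)]) ++ rest := by
        rw [hdrop]; simp
      have := ih (g ++ [(x, m)]) (running + d) pos h1 (by simp)
      simpa using this
    · cases g with
      | nil =>
        -- open batch empty: A restarts silently, B's count = 0 so no boundary
        have hr0 : running = 0 := hz rfl
        have hnb : ¬ (((0:Int) > 0) ∧ running + d > max_duration) := by
          rintro ⟨h, _⟩; omega
        rw [if_neg hle]
        simp only [List.length_nil, Nat.cast_zero, if_neg hnb]
        have h1 : P.drop pos = [(x, m)] ++ rest := by simpa using hdrop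
        have := ih [(x, m)] d pos h1 (by simp)
        simp only [List.map, List.length_cons, List.length_nil] at this ⊢
        rw [hr0]; simpa using this
      | cons a g' =>
        -- open batch non-empty: A yields it, B records a boundary of size g.length
        have hlen : (0 : Int) < (((a :: g').length : Nat) : Int) := by
          simp
        have hb : (((((a :: g').length : Nat)) : Int) > 0) ∧ running + d > max_duration :=
          ⟨hlen, by omega⟩
        rw [if_neg hle, if_pos hb]
        have hchunk : PySem.List.slice P (some (pos : Int))
            (some ((pos : Int) + (((a :: g').length : Nat) : Int))) = a :: g' := by
          rw [PySem.List.slice_natCast_add, hdrop]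
          simp
        have hdrop' : P.drop (pos + (a :: g').length) = [(x, m)] ++ rest := by
          have h := congrArg (List.drop (a :: g').length) hdrop
          rw [List.drop_drop] at h
          rw [List.drop_left] at h
          exact h
        have hrec := ih [(x, m)] d (pos + (a :: g').length) hdrop' (by simp)
        simp only [List.map, List.length_cons, List.length_nil] at hrec
        have hchunk' : PySem.List.slice P (some (pos : Int))
            (some ((pos : Int) + ((g'.length : Int) + 1))) = a :: g' := by
          rw [show ((pos : Int) + ((g'.length : Int) + 1))
              = (pos : Int) + (((a :: g').length : Nat) : Int) from by
            simp [List.length_cons]]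
          exact hchunk
        simp only [pvEmit, List.length_cons, List.map_cons, Nat.cast_add, Nat.cast_one]
        rw [hchunk', if_pos (List.cons_ne_nil _ _), List.singleton_append]
        rw [hrec]
        congr 1
-- ===== VERDICT (by name: the statement is the Claim_ definition above) =====
theorem batch_inputs_spec : Claim_equal_batch_inputs := by
  intro inputs metadata max_duration _ _
  unfold Spec_batch_inputs batch_inputs batch_inputs_alt
  have := pv_main max_duration (inputs.zip metadata) (inputs.zip metadata) [] 0 0
    (by simp) (fun _ => rfl)
  simpa using this
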